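-- pv_equiv track=rewrite | github.com/GreenScreen410/Problem-Solving | 백준/Bronze/24606. Double Password/Double Password.py | count_login_sequences
-- ===== SOURCE A (Python) =====
-- def count_login_sequences(pass1, pass2):
--     possibilities_per_digit = [0, 0, 0, 0]
--
--     for i in range(4):
--         if pass1[i] == pass2[i]:
--             possibilities_per_digit[i] = 1
--         else:
--             possibilities_per_digit[i] = 2
--
--     total_combinations = 1
--     for possibilities in possibilities_per_digit:
--         total_combinations *= possibilities
--
--     return total_combinations
-- ===== SOURCE B (Python) =====
-- def count_login_sequences(pass1, pass2):
--     seqs = {""}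
--     for i in range(4):
--         seqs = {s + c for s in seqs for c in (pass1[i], pass2[i])}
--     return len(seqs)
-- ===== Notes on version B (the rewrite author's own statement) =====
-- stated objective: alternative
-- what changed: Instead of building a per-digit possibilities table and folding a product, B enumerates the actual candidate login sequences as a set of strings (choosing each position's character from either password) and returns the set's size.
import Mathlib
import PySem

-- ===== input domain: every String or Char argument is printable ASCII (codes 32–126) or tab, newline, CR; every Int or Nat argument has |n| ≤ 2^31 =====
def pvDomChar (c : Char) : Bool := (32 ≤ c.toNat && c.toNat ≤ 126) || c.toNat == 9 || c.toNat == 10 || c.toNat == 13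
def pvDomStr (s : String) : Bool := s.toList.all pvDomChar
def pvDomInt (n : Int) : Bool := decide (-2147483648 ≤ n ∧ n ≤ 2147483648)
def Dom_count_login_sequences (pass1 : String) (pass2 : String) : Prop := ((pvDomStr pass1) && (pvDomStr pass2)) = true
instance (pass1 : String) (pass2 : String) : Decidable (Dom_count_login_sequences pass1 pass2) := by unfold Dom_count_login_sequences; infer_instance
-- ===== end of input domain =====

-- B enumerates the candidate login sequences as a set of strings (choosing each position's character from the two passwords) and returns the set's size, instead of A's per-digit possibilities table folded into a product (alternative algorithm; equivalence is proved here only on inputs where both strings have at least 4 characters — Python A raises IndexError otherwise).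


-- ===== PORT A =====
-- Port of A: per-index possibilities table (set in place over range(4)), then a product fold.
-- Indexing pass?[i] is PySem.List.pyGetD / pySetD, exact under Pre_ (indices 0..3 in range).
def count_login_sequences (pass1 : String) (pass2 : String) : Int :=
  let poss : List Int := (PySem.List.pyRange 0 4 1).foldl (fun l i =>
    PySem.List.pySetD l i
      (if PySem.List.pyGetD pass1.toList i ' ' = PySem.List.pyGetD pass2.toList i ' '
       then 1 else 2))
    [0, 0, 0, 0]
  poss.foldl (fun t p => t * p) 1

-- ===== PORT B =====
-- Port of B: grow a set of candidate sequences (strings as List Char), one position at a time,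
-- taking each position's character from either password; return the set's size.
def count_login_sequences_alt (pass1 : String) (pass2 : String) : Int :=
  let seqs : PySem.Set (List Char) := (PySem.List.pyRange 0 4 1).foldl (fun seqs i =>
    PySem.Set.ofList (seqs.flatMap (fun s =>
      [s ++ [PySem.List.pyGetD pass1.toList i ' '],
       s ++ [PySem.List.pyGetD pass2.toList i ' ']])))
    (PySem.Set.ofList [[]])
  PySem.Set.len seqs

-- ===== PRECONDITION & SPEC =====
-- Pre_: both strings have at least 4 characters; on shorter inputs Python A raises IndexError.
def Pre_count_login_sequences (pass1 : String) (pass2 : String) : Prop :=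
  4 ≤ pass1.toList.length ∧ 4 ≤ pass2.toList.length
instance (pass1 : String) (pass2 : String) : Decidable (Pre_count_login_sequences pass1 pass2) := by
  unfold Pre_count_login_sequences; infer_instance
def pvWitness_count_login_sequences : String × String := ("1234", "1284")
def Spec_count_login_sequences (pass1 : String) (pass2 : String) (out : Int) : Prop := out = count_login_sequences_alt pass1 pass2
instance (pass1 : String) (pass2 : String) (out : Int) : Decidable (Spec_count_login_sequences pass1 pass2 out) := by unfold Spec_count_login_sequences; infer_instance

-- ===== CLAIM (what is proved, stated in full; the proofs are below) =====
def Claim_equal_count_login_sequences : Prop := ∀ (pass1 : String) (pass2 : String), Dom_count_login_sequences pass1 pass2 → Pre_count_login_sequences pass1 pass2 → Spec_count_login_sequences pass1 pass2 (count_login_sequences pass1 pass2)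

-- ===== LEMMAS AND PROOFS =====

-- One growth step of B's set: extending each of the |L| distinct prefixes by one of the two
-- characters yields (1 if c1 = c2 else 2) * |L| distinct sequences.
lemma pvStep_len (L : List (List Char)) (hL : L.Nodup) (c1 c2 : Char) :
    (PySem.Set.ofList (L.flatMap (fun s => [s ++ [c1], s ++ [c2]]))).length
      = (if c1 = c2 then 1 else 2) * L.length := by
  by_cases h : c1 = c2
  · subst h
    -- members are exactly those of L.map (· ++ [c1]), which is nodup
    have hm : ∀ x, x ∈ PySem.Set.ofList (L.flatMap (fun s => [s ++ [c1], s ++ [c1]]))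
        ↔ x ∈ L.map (fun s => s ++ [c1]) := by
      intro x
      simp [PySem.Set.mem_ofList, List.mem_flatMap, List.mem_map]
      tauto
    have hmap : (L.map (fun s => s ++ [c1])).Nodup :=
      hL.map (List.append_left_injective [c1])
    have hperm := (List.perm_ext_iff_of_nodup
      (PySem.Set.nodup_ofList _) hmap).mpr hm
    simp [hperm.length_eq]
  · -- the flatMap list is itself nodup, so the set keeps all 2·|L| elements
    have hnd : (L.flatMap (fun s => [s ++ [c1], s ++ [c2]])).Nodup := by
      refine List.nodup_flatMap.mpr ⟨?_, ?_⟩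
      · intro s _
        have hne : s ++ [c1] ≠ s ++ [c2] := fun he =>
          h (by simpa using List.append_cancel_left he)
        simp [hne]
      · refine hL.imp ?_
        intro a b hab x hx hx'
        simp only [List.mem_cons, List.not_mem_nil, or_false] at hx hx'
        rcases hx with hx | hx <;> rcases hx' with hx' | hx' <;> subst hx <;>
          exact hab (List.append_inj' hx' rfl).1
    have hperm := (List.perm_ext_iff_of_nodup
      (PySem.Set.nodup_ofList _) hnd).mpr
      (fun x => PySem.Set.mem_ofList _ x)
    rw [hperm.length_eq, List.length_flatMap]
    simp only [if_neg h]
    induction L with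
    | nil => simp
    | cons a t ih => simp at *; omega

-- ===== VERDICT (by name: the statement is the Claim_ definition above) =====
theorem count_login_sequences_spec : Claim_equal_count_login_sequences := by
  intro pass1 pass2 _ _
  unfold Spec_count_login_sequences count_login_sequences count_login_sequences_alt
  simp only [show PySem.List.pyRange 0 4 1 = [0, 1, 2, 3] from rfl, List.foldl_cons,
    List.foldl_nil, PySem.Set.len]
  set x0 := PySem.List.pyGetD pass1.toList (0 : Int) ' ' with hx0
  set y0 := PySem.List.pyGetD pass2.toList (0 : Int) ' ' with hy0
  set x1 := PySem.List.pyGetD pass1.toList (1 : Int) ' ' with hx1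
  set y1 := PySem.List.pyGetD pass2.toList (1 : Int) ' ' with hy1
  set x2 := PySem.List.pyGetD pass1.toList (2 : Int) ' ' with hx2
  set y2 := PySem.List.pyGetD pass2.toList (2 : Int) ' ' with hy2
  set x3 := PySem.List.pyGetD pass1.toList (3 : Int) ' ' with hx3
  set y3 := PySem.List.pyGetD pass2.toList (3 : Int) ' ' with hy3
  rw [show PySem.Set.ofList [([] : List Char)] = [[]] from rfl,
    pvStep_len _ (PySem.Set.nodup_ofList _) x3 y3,
    pvStep_len _ (PySem.Set.nodup_ofList _) x2 y2,
    pvStep_len _ (PySem.Set.nodup_ofList _) x1 y1,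
    pvStep_len [[]] (by simp) x0 y0]
  push_cast
  by_cases h0 : x0 = y0 <;> by_cases h1 : x1 = y1 <;> by_cases h2 : x2 = y2 <;>
    by_cases h3 : x3 = y3 <;>
    simp [h0, h1, h2, h3, PySem.List.pySetD, PySem.List.pySet?, PySem.List.pyIdx?, List.set]
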